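-- pv_equiv track=rewrite | github.com/anjli01/Python-Functions | 32.py | count_occurrences_before
-- ===== SOURCE A (Python) =====
-- from typing import List, Any
-- from typing import List, Any, Type
-- from typing import List, Any
-- from typing import Dict, Any
-- from typing import List, Generator, TypeVar
-- from typing import List, Any
-- from typing import List, Any
-- from typing import List, Union
--
-- def count_occurrences_before(sequence: List[Any], target: Any, stop_element: Any) -> int:
--     """
--     Counts occurrences of a target element in a list before a stop element is found.
--
--     Args:
--         sequence: The list to search through.
--         target: The element to count.
--         stop_element: The element that stops the search.
--
--     Returns:
--         The number of times 'target' appears before 'stop_element'.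
--     """
--     count = 0
--     for item in sequence:
--         if item == stop_element:
--             break
--         if item == target:
--             count += 1
--     return count
-- ===== SOURCE B (Python) =====
-- def count_occurrences_before(sequence, target, stop_element):
--     try:
--         prefix = sequence[:sequence.index(stop_element)]
--     except ValueError:
--         prefix = sequence
--     return prefix.count(target)
-- ===== Notes on version B (the rewrite author's own statement) =====
-- stated objective: simpler
-- what changed: B finds the cutoff once with list.index (whole list if absent), slices the prefix, and returns prefix.count(target), replacing A's fused early-exit counting loop with two library passes.
import Mathlib
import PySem

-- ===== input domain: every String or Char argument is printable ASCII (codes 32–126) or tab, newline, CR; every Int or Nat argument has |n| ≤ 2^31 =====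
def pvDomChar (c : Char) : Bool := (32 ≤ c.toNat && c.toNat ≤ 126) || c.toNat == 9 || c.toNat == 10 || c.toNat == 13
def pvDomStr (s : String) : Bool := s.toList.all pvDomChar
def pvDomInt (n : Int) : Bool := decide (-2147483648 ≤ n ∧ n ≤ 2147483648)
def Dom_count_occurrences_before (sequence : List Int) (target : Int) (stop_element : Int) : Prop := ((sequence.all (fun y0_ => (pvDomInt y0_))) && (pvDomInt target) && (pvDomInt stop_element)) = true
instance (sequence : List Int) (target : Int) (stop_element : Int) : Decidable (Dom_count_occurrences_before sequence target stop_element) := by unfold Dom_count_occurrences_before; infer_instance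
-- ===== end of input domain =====

-- B replaces A's fused early-exit counting loop by: find the cutoff with index (whole list if
-- absent), slice the prefix, count target in it (objective: simpler decomposition).

-- ===== PORT A =====
-- A's for-loop with break, as structural recursion carrying the count accumulator
def count_occurrences_before_loop (sequence : List Int) (target : Int) (stop_element : Int) (count : Int) : Int :=
  match sequence with
  | [] => count
  | item :: rest =>
      if item == stop_element then count
      else if item == target then count_occurrences_before_loop rest target stop_element (count + 1)
      else count_occurrences_before_loop rest target stop_element count

def count_occurrences_before (sequence : List Int) (target : Int) (stop_element : Int) : Int :=
  count_occurrences_before_loop sequence target stop_element 0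

-- ===== PORT B =====
def count_occurrences_before_alt (sequence : List Int) (target : Int) (stop_element : Int) : Int :=
  let pref :=
    match PySem.List.index? sequence stop_element with
    | some i => PySem.List.slice sequence none (some (i : Int))   -- sequence[:idx]
    | none   => sequence                                          -- ValueError: whole list
  (PySem.List.count pref target : Int)

-- ===== PRECONDITION & SPEC =====
def Spec_count_occurrences_before (sequence : List Int) (target : Int) (stop_element : Int) (out : Int) : Prop := out = count_occurrences_before_alt sequence target stop_element
instance (sequence : List Int) (target : Int) (stop_element : Int) (out : Int) : Decidable (Spec_count_occurrences_before sequence target stop_element out) := by unfold Spec_count_occurrences_before; infer_instance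

-- ===== CLAIM (what is proved, stated in full; the proofs are below) =====
def Claim_equal_count_occurrences_before : Prop := ∀ (sequence : List Int) (target : Int) (stop_element : Int), Dom_count_occurrences_before sequence target stop_element → Spec_count_occurrences_before sequence target stop_element (count_occurrences_before sequence target stop_element)

-- ===== LEMMAS AND PROOFS =====

-- B's prefix is the longest prefix not containing stop_element
theorem alt_prefix_eq_takeWhile (sequence : List Int) (stop_element : Int) :
    (match PySem.List.index? sequence stop_element with
       | some i => PySem.List.slice sequence none (some (i : Int))
       | none   => sequence) = sequence.takeWhile (fun x => x != stop_element) := by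
  induction sequence with
  | nil => rfl
  | cons x xs ih =>
    by_cases hx : x = stop_element
    · subst hx
      rw [List.takeWhile_cons]
      rw [show PySem.List.index? (x :: xs) x = some 0 from PySem.List.index?_cons_self x xs]
      show PySem.List.slice (x :: xs) none (some ((0:Nat):Int)) =
        if (x != x) = true then x :: List.takeWhile (fun y => y != x) xs else []
      rw [PySem.List.slice_to_natCast]
      simp
    · rw [PySem.List.index?_cons_of_ne xs hx, List.takeWhile_cons]
      rcases h : PySem.List.index? xs stop_element with _ | i
      · rw [h] at ih
        simpa [hx] using ih
      · rw [h] at ih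
        have ih' : List.take i xs = List.takeWhile (fun x => x != stop_element) xs := by
          simpa [PySem.List.slice_to_natCast] using ih
        simp only [Option.map_some]
        rw [PySem.List.slice_to_natCast, List.take_succ_cons]
        simp [hx, ih']

-- A's loop counts target in the takeWhile-prefix, added to the accumulator
theorem loop_eq (sequence : List Int) (target stop_element count : Int) :
    count_occurrences_before_loop sequence target stop_element count
      = count + ((sequence.takeWhile (fun x => x != stop_element)).count target : Int) := by
  induction sequence generalizing count with
  | nil => simp [count_occurrences_before_loop]
  | cons x xs ih =>
    rw [List.takeWhile_cons]
    by_cases hx : x = stop_element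
    · subst hx
      simp [count_occurrences_before_loop]
    · by_cases ht : x = target
      · subst ht
        simp only [count_occurrences_before_loop, beq_iff_eq, hx, if_false]
        rw [ih]
        simp [hx]
        ring
      · simp only [count_occurrences_before_loop, beq_iff_eq, hx, ht, if_false]
        rw [ih]
        simp [hx, ht]

-- ===== VERDICT (by name: the statement is the Claim_ definition above) =====
theorem count_occurrences_before_spec : Claim_equal_count_occurrences_before := by
  intro sequence target stop_element _
  unfold Spec_count_occurrences_before count_occurrences_before count_occurrences_before_alt
  rw [loop_eq, alt_prefix_eq_takeWhile]
  simp [PySem.List.count_eq]
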